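-- pv_equiv track=rewrite | github.com/BrunoVerne/EjerciciosAlgoritmos | ProgramacionDInamica/eventos.py | eventos
-- ===== SOURCE A (Python) =====
-- def eventos(actividades):
--     n = len(actividades)
--     m = len(actividades[0])
--
--     OPT = []
--     for i in range(n):
--         fila = [0] * m
--         OPT.append(fila)
--
--     for j in range(m):
--         OPT[0][j] = actividades[0][j]
--
--     for i in range(1,n):
--         for j in range(m): #actividades actuales representadas en j
--             maximo_anterior = float("-inf") #representa un -infinito
--             for k in range(m): #recorro las actividades anteriores representadas en k
--                 if j == k:
--                     continue # no se puede repetir lo del dia pasado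
--                 elif k == 0 and j !=3:
--                     continue
--
--                 maximo_anterior = max(maximo_anterior, OPT[i-1][k])
--
--             if maximo_anterior != float("-inf"):
--                 OPT[i][j] = actividades[i][j] + maximo_anterior
--             else:
--                 OPT[i][j] = actividades[i][j]
--
--     return max(OPT[n-1])
-- ===== SOURCE B (Python) =====
-- # B: same DP, but the inner "max over allowed previous columns" scan is replaced by
-- # running prefix maxima and a precomputed suffix-max table, giving O(n*m) instead of O(n*m^2).
--
-- def _suffix_max(prev):
--     # suf[j] = max(prev[j+1:]) or None if empty
--     suf = []
--     acc = None
--     for v in reversed(prev):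
--         suf.append(acc)
--         acc = v if acc is None else max(acc, v)
--     suf.reverse()
--     return suf
--
-- def _next_row(prev, row):
--     suf = _suffix_max(prev)
--     cur = []
--     p0 = None  # max(prev[:j])
--     p1 = None  # max(prev[1:j])
--     for j in range(len(prev)):
--         a = p0 if j == 3 else p1
--         b = suf[j]
--         best = b if a is None else (a if b is None else max(a, b))
--         cur.append(row[j] if best is None else row[j] + best)
--         p0 = prev[j] if p0 is None else max(p0, prev[j])
--         if j >= 1:
--             p1 = prev[j] if p1 is None else max(p1, prev[j])
--     return cur
--
-- def eventos(actividades):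
--     m = len(actividades[0])
--     prev = list(actividades[0][:m])
--     for i in range(1, len(actividades)):
--         prev = _next_row(prev, actividades[i][:m])
--     return max(prev)
-- ===== Notes on version B (the rewrite author's own statement) =====
-- stated objective: faster
-- what changed: B replaces A's O(m) inner scan over all previous-day activities for every cell by running prefix maxima (from index 0 and from index 1) plus a precomputed suffix-max table, so each DP cell is filled in O(1).
import Mathlib
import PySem

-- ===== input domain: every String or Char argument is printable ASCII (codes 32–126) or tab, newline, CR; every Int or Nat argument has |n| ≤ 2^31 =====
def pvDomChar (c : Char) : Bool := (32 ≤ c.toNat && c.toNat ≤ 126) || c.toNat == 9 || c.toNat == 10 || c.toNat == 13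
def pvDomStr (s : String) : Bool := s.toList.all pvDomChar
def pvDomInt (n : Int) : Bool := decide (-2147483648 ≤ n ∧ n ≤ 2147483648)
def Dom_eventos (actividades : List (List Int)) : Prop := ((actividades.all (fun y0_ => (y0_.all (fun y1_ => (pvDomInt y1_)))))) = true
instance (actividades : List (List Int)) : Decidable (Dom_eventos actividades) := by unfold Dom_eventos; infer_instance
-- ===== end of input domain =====

-- B replaces A's O(m) inner scan per cell by running prefix maxima and a suffix-max table: O(n*m) instead of O(n*m^2).

-- shared tiny helper: Python's `x if acc is None else max(acc, x)` (the float("-inf") accumulator of A, the None accumulators of B)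
def eventosOm (acc : Option Int) (v : Int) : Option Int :=
  match acc with
  | none => some v
  | some a => some (max a v)

-- ===== PORT A =====
def eventos (actividades : List (List Int)) : Int :=
  let n : Int := (actividades.length : Int)
  let m : Int := ((PySem.List.pyGetD actividades 0 []).length : Int)
  -- OPT[0][j] = actividades[0][j]
  let row0 : List Int := (PySem.List.pyRange 0 m 1).map
    (fun j => PySem.List.pyGetD (PySem.List.pyGetD actividades 0 []) j 0)
  -- for i in range(1, n): fill OPT[i] from OPT[i-1]
  let opt : List (List Int) := (PySem.List.pyRange 1 n 1).foldl (fun OPT i =>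
    let prev := PySem.List.pyGetD OPT (i - 1) []
    let rowi := PySem.List.pyGetD actividades i []
    let newRow : List Int := (PySem.List.pyRange 0 m 1).foldl (fun cur j =>
      let maxi : Option Int := (PySem.List.pyRange 0 m 1).foldl (fun acc k =>
        if k = j then acc
        else if k = 0 ∧ j ≠ 3 then acc
        else eventosOm acc (PySem.List.pyGetD prev k 0)) none
      cur ++ [match maxi with
              | some v => PySem.List.pyGetD rowi j 0 + v
              | none => PySem.List.pyGetD rowi j 0]) []
    OPT ++ [newRow]) [row0]
  (PySem.List.max? (PySem.List.pyGetD opt (n - 1) []) (fun x => x)).getD 0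

-- ===== PORT B =====
-- _suffix_max: suf[j] = max(prev[j+1:]) or None
def eventosSufMax (prev : List Int) : List (Option Int) :=
  let st := prev.reverse.foldl
    (fun (st : List (Option Int) × Option Int) v => (st.1 ++ [st.2], eventosOm st.2 v))
    ([], none)
  st.1.reverse

-- _next_row
def eventosNextRow (prev row : List Int) : List Int :=
  let suf := eventosSufMax prev
  let st := (PySem.List.pyRange 0 (prev.length : Int) 1).foldl
    (fun (st : List Int × Option Int × Option Int) j =>
      let cur := st.1
      let p0 := st.2.1
      let p1 := st.2.2
      let a : Option Int := if j = 3 then p0 else p1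
      let b : Option Int := PySem.List.pyGetD suf j none
      let best : Option Int :=
        match a with
        | none => b
        | some av => match b with
                     | none => some av
                     | some bv => some (max av bv)
      let pv := PySem.List.pyGetD prev j 0
      (cur ++ [match best with
               | none => PySem.List.pyGetD row j 0
               | some v => PySem.List.pyGetD row j 0 + v],
       eventosOm p0 pv,
       if 1 ≤ j then eventosOm p1 pv else p1))
    ([], none, none)
  st.1

def eventos_alt (actividades : List (List Int)) : Int :=
  let m : Int := ((PySem.List.pyGetD actividades 0 []).length : Int)
  let prev0 := PySem.List.slice (PySem.List.pyGetD actividades 0 []) none (some m)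
  let prevN := (PySem.List.pyRange 1 (actividades.length : Int) 1).foldl
    (fun prev i => eventosNextRow prev (PySem.List.slice (PySem.List.pyGetD actividades i []) none (some m)))
    prev0
  (PySem.List.max? prevN (fun x => x)).getD 0

-- ===== PRECONDITION & SPEC =====
-- Pre_ excludes exactly the inputs where Python A raises: the empty list (IndexError on
-- actividades[0]), a first row of length 0 (max of an empty list, ValueError), and a later
-- row shorter than the first (IndexError on actividades[i][j]).
def Pre_eventos (actividades : List (List Int)) : Prop :=
  actividades ≠ [] ∧ 0 < (actividades.headI).length ∧
    ∀ row ∈ actividades, (actividades.headI).length ≤ row.length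
instance (actividades : List (List Int)) : Decidable (Pre_eventos actividades) := by
  unfold Pre_eventos; infer_instance

def pvWitness_eventos : List (List Int) := [[1, 2, 3, 4], [5, 1, 2, 0], [3, 3, 3, 3]]

def Spec_eventos (actividades : List (List Int)) (out : Int) : Prop := out = eventos_alt actividades
instance (actividades : List (List Int)) (out : Int) : Decidable (Spec_eventos actividades out) := by
  unfold Spec_eventos; infer_instance

-- ===== CLAIM (what is proved, stated in full; the proofs are below) =====
def Claim_equal_eventos : Prop := ∀ (actividades : List (List Int)), Dom_eventos actividades → Pre_eventos actividades → Spec_eventos actividades (eventos actividades)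

-- ===== LEMMAS AND PROOFS =====

-- max of a possibly-empty segment (the value of a float("-inf")/None running maximum)
def segMax (l : List Int) : Option Int := l.foldl eventosOm none

-- combining two optional maxima
def optJoin (a b : Option Int) : Option Int :=
  match a, b with
  | none, b => b
  | some x, none => some x
  | some x, some y => some (max x y)

-- the maximum A's inner k-scan is allowed to see, in closed form
def prefPart (prev : List Int) (j : Int) : Option Int :=
  if j = 3 then segMax (prev.take 3) else segMax ((prev.take j.toNat).drop 1)

-- the value both programs put at column j of a new row
def outSpec (prev row : List Int) (j : Nat) : Int :=
  match optJoin (prefPart prev (j : Int)) (segMax (prev.drop (j + 1))) with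
  | none => PySem.List.pyGetD row (j : Int) 0
  | some v => PySem.List.pyGetD row (j : Int) 0 + v

theorem foldl_om_eq (l : List Int) (a : Option Int) :
    l.foldl eventosOm a = optJoin a (segMax l) := by
  induction l generalizing a with
  | nil => cases a <;> simp [segMax, optJoin]
  | cons x xs ih =>
    simp only [segMax, List.foldl_cons]
    rw [ih (eventosOm a x), ih (eventosOm none x)]
    cases a <;> cases h : segMax xs <;>
      simp [eventosOm, optJoin, max_assoc]

theorem segMax_append_singleton (l : List Int) (x : Int) :
    segMax (l ++ [x]) = eventosOm (segMax l) x := by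
  simp only [segMax, List.foldl_append, List.foldl_cons, List.foldl_nil]

theorem segMax_reverse (l : List Int) : segMax l.reverse = segMax l := by
  induction l using List.reverseRecOn with
  | nil => rfl
  | append_singleton xs x ih =>
    rw [segMax_append_singleton, List.reverse_append]
    simp only [List.reverse_cons, List.reverse_nil, List.nil_append, List.singleton_append]
    show segMax (x :: xs.reverse) = _
    have : segMax (x :: xs.reverse) = xs.reverse.foldl eventosOm (some x) := rfl
    rw [this, foldl_om_eq, ih]
    cases h : segMax xs <;> simp [optJoin, eventosOm, max_comm]

theorem foldl_om_range (xs : List Int) (a b : Int) (acc : Option Int)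
    (h0 : 0 ≤ a) (hb : b ≤ (xs.length : Int)) :
    (PySem.List.pyRange a b 1).foldl (fun acc k => eventosOm acc (PySem.List.pyGetD xs k 0)) acc
      = ((xs.take b.toNat).drop a.toNat).foldl eventosOm acc := by
  rcases le_or_gt b a with h | h
  · rw [PySem.List.pyRange_one_eq_nil h]
    have : (xs.take b.toNat).length ≤ a.toNat := by
      rw [List.length_take]; omega
    rw [List.drop_eq_nil_of_le this]
    rfl
  · have hlen : a.toNat < (xs.take b.toNat).length := by
      rw [List.length_take]; omega
    have hget : (xs.take b.toNat)[a.toNat] = xs[a.toNat]'(by omega) := List.getElem_take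
    rw [PySem.List.pyRange_one_cons h, List.foldl_cons,
        List.drop_eq_getElem_cons hlen, List.foldl_cons, hget,
        PySem.List.pyGetD_eq_getElem xs 0 h0 (by omega)]
    have ht : (a + 1).toNat = a.toNat + 1 := by omega
    rw [foldl_om_range xs (a + 1) b (eventosOm acc xs[a.toNat]) (by omega) hb, ht]
termination_by (b - a).toNat
decreasing_by omega

theorem scanA_eq (prev : List Int) (j : Int) (hj0 : 0 ≤ j) (hj : j < (prev.length : Int)) :
    (PySem.List.pyRange 0 (prev.length : Int) 1).foldl (fun acc k =>
        if k = j then acc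
        else if k = 0 ∧ j ≠ 3 then acc
        else eventosOm acc (PySem.List.pyGetD prev k 0)) none
      = optJoin (prefPart prev j) (segMax (prev.drop (j.toNat + 1))) := by
  have hsplit : PySem.List.pyRange 0 (prev.length : Int) 1
      = PySem.List.pyRange 0 j 1 ++ (j :: PySem.List.pyRange (j + 1) (prev.length : Int) 1) := by
    rw [PySem.List.pyRange_one_append 0 j (prev.length : Int) hj0 (le_of_lt hj),
        PySem.List.pyRange_one_cons hj]
  rw [hsplit, List.foldl_append, List.foldl_cons, if_pos rfl]
  rw [PySem.List.foldl_congr_mem (PySem.List.pyRange (j + 1) (prev.length : Int) 1) _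
        (fun acc k => eventosOm acc (PySem.List.pyGetD prev k 0)) _ (by
      intro acc k hk
      have hm := PySem.List.mem_pyRange_one.mp hk
      rw [if_neg (by omega), if_neg (by rintro ⟨h1, h2⟩; omega)])]
  rw [foldl_om_range prev (j + 1) (prev.length : Int) _ (by omega) (by omega)]
  have htk : prev.take (prev.length : Int).toNat = prev := by
    simp
  have htn : (j + 1).toNat = j.toNat + 1 := by omega
  rw [htk, htn, foldl_om_eq]
  congr 1
  -- the prefix fold equals prefPart
  by_cases h3 : j = 3
  · subst h3
    rw [PySem.List.foldl_congr_mem (PySem.List.pyRange 0 3 1) _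
          (fun acc k => eventosOm acc (PySem.List.pyGetD prev k 0)) _ (by
        intro acc k hk
        have hm := PySem.List.mem_pyRange_one.mp hk
        rw [if_neg (by omega), if_neg (by rintro ⟨h1, h2⟩; omega)])]
    rw [foldl_om_range prev 0 3 none (by omega) (by omega)]
    simp [prefPart, segMax]
  · rcases eq_or_lt_of_le hj0 with h0 | h0
    · rw [PySem.List.pyRange_one_eq_nil (by omega)]
      simp [prefPart, segMax, ← h0]
    · rw [PySem.List.pyRange_one_cons h0, List.foldl_cons,
          if_neg (by omega), if_pos ⟨rfl, h3⟩, zero_add]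
      rw [PySem.List.foldl_congr_mem (PySem.List.pyRange 1 j 1) _
            (fun acc k => eventosOm acc (PySem.List.pyGetD prev k 0)) _ (by
          intro acc k hk
          have hm := PySem.List.mem_pyRange_one.mp hk
          rw [if_neg (by omega), if_neg (by rintro ⟨h1, h2⟩; omega)])]
      rw [foldl_om_range prev 1 j none (by omega) (by omega)]
      simp [prefPart, h3, segMax]

theorem revfold_spec (l : List Int) :
    l.foldl (fun (st : List (Option Int) × Option Int) v => (st.1 ++ [st.2], eventosOm st.2 v)) ([], none)
      = ((List.range l.length).map (fun i => segMax (l.take i)), segMax l) := by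
  induction l using List.reverseRecOn with
  | nil => rfl
  | append_singleton xs x ih =>
    rw [List.foldl_append, ih, List.foldl_cons, List.foldl_nil]
    rw [segMax_append_singleton]
    refine Prod.ext ?_ rfl
    show (List.range xs.length).map (fun i => segMax (xs.take i)) ++ [segMax xs]
        = (List.range (xs ++ [x]).length).map (fun i => segMax ((xs ++ [x]).take i))
    rw [List.length_append, List.length_cons, List.length_nil, List.range_succ, List.map_append]
    congr 1
    · apply List.map_congr_left
      intro i hi
      rw [List.mem_range] at hi
      rw [List.take_append_of_le_length (le_of_lt hi)]
    · simp

theorem sufMax_get (prev : List Int) (j : Int) (h0 : 0 ≤ j) (hj : j < (prev.length : Int)) :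
    PySem.List.pyGetD (eventosSufMax prev) j none = segMax (prev.drop (j.toNat + 1)) := by
  unfold eventosSufMax
  rw [revfold_spec]
  have hlen : prev.reverse.length = prev.length := List.length_reverse
  have hjl : j.toNat < prev.length := by omega
  rw [PySem.List.pyGetD_eq_getElem _ _ h0 (by
    simp [hlen]
    omega)]
  rw [List.getElem_reverse, List.getElem_map, List.getElem_range]
  have hle : prev.length - 1 - j.toNat ≤ prev.length := by omega
  rw [List.length_map, List.length_range, hlen]
  rw [List.take_reverse, show prev.length - (prev.length - 1 - j.toNat) = j.toNat + 1 by omega,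
      segMax_reverse]

theorem nextRowAux (prev row : List Int) (t : Nat) (ht : t ≤ prev.length) :
    (PySem.List.pyRange 0 (t : Int) 1).foldl
      (fun (st : List Int × Option Int × Option Int) j =>
        let cur := st.1
        let p0 := st.2.1
        let p1 := st.2.2
        let a : Option Int := if j = 3 then p0 else p1
        let b : Option Int := PySem.List.pyGetD (eventosSufMax prev) j none
        let best : Option Int :=
          match a with
          | none => b
          | some av => match b with
                       | none => some av
                       | some bv => some (max av bv)
        let pv := PySem.List.pyGetD prev j 0
        (cur ++ [match best with
                 | none => PySem.List.pyGetD row j 0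
                 | some v => PySem.List.pyGetD row j 0 + v],
         eventosOm p0 pv,
         if 1 ≤ j then eventosOm p1 pv else p1))
      ([], none, none)
    = ((List.range t).map (outSpec prev row),
       segMax (prev.take t), segMax ((prev.take t).drop 1)) := by
  induction t with
  | zero => rfl
  | succ t ih =>
    have h1 : ((t + 1 : Nat) : Int) = (t : Int) + 1 := by push_cast; ring
    rw [h1, PySem.List.pyRange_one_succ_right (by positivity), List.foldl_append,
        ih (by omega), List.foldl_cons, List.foldl_nil]
    have htl : t < prev.length := by omega
    have hb : PySem.List.pyGetD (eventosSufMax prev) (t : Int) none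
        = segMax (prev.drop ((t : Int).toNat + 1)) :=
      sufMax_get prev (t : Int) (by positivity) (by exact_mod_cast htl)
    have hpv : PySem.List.pyGetD prev (t : Int) 0 = prev[t] := by
      rw [PySem.List.pyGetD_eq_getElem prev 0 (by positivity) (by exact_mod_cast htl)]
      simp
    have htake : prev.take (t + 1) = prev.take t ++ [prev[t]] := by
      rw [List.take_add_one, List.getElem?_eq_getElem htl]
      rfl
    refine Prod.ext ?_ (Prod.ext ?_ ?_)
    · dsimp only
      rw [List.range_succ, List.map_append, List.map_cons, List.map_nil]
      congr 1
      congr 1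
      show _ = outSpec prev row t
      unfold outSpec
      rw [hb, show ((t : Int).toNat + 1) = t + 1 by omega]
      by_cases h3 : (t : Int) = 3
      · have h3' : t = 3 := by omega
        rw [if_pos h3]
        unfold prefPart
        rw [if_pos h3, h3']
        cases hx : segMax (prev.take 3) <;> cases hy : segMax (prev.drop (3 + 1)) <;>
          simp [optJoin]
      · rw [if_neg h3]
        unfold prefPart
        rw [if_neg h3, show ((t : Int).toNat) = t by omega]
        cases hx : segMax ((prev.take t).drop 1) <;> cases hy : segMax (prev.drop (t + 1)) <;>
          simp [optJoin]
    · dsimp only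
      rw [hpv, htake, segMax_append_singleton]
    · dsimp only
      rcases Nat.eq_zero_or_pos t with h0 | h0
      · subst h0
        rw [if_neg (by norm_num),
            show (prev.take (0 + 1)).drop 1 = [] from
              List.drop_eq_nil_of_le (by rw [List.length_take]; omega)]
        rfl
      · rw [if_pos (by exact_mod_cast h0), hpv, htake,
            List.drop_append_of_le_length (by rw [List.length_take]; omega),
            segMax_append_singleton]

theorem nextRow_spec (prev row : List Int) :
    eventosNextRow prev row = (List.range prev.length).map (outSpec prev row) := by
  unfold eventosNextRow
  dsimp only
  rw [nextRowAux prev row prev.length le_rfl]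

theorem row_eq (prev rowi : List Int) (m : Nat) (hm : prev.length = m) :
    (PySem.List.pyRange 0 (m : Int) 1).foldl (fun cur j => cur ++
        [match (PySem.List.pyRange 0 (m : Int) 1).foldl (fun acc k =>
            if k = j then acc
            else if k = 0 ∧ j ≠ 3 then acc
            else eventosOm acc (PySem.List.pyGetD prev k 0)) none with
          | some v => PySem.List.pyGetD rowi j 0 + v
          | none => PySem.List.pyGetD rowi j 0]) []
      = eventosNextRow prev (PySem.List.slice rowi none (some (m : Int))) := by
  rw [nextRow_spec, hm, PySem.List.slice_to rowi (by positivity),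
      show ((m : Int)).toNat = m by omega]
  rw [PySem.List.foldl_append_singleton_eq_map, List.nil_append]
  apply List.ext_getElem
  · simp [PySem.List.length_pyRange_one]
  intro i h1 h2
  have hi : i < m := by
    simpa [PySem.List.length_pyRange_one] using h1
  rw [List.getElem_map, List.getElem_map, List.getElem_range,
      PySem.List.getElem_pyRange_one]
  show (match (PySem.List.pyRange 0 (m : Int) 1).foldl (fun acc k =>
          if k = (0 + (i : Int)) then acc
          else if k = 0 ∧ (0 + (i : Int)) ≠ 3 then acc
          else eventosOm acc (PySem.List.pyGetD prev k 0)) none with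
        | some v => PySem.List.pyGetD rowi (0 + (i : Int)) 0 + v
        | none => PySem.List.pyGetD rowi (0 + (i : Int)) 0)
      = outSpec prev (rowi.take m) i
  have hz : (0 : Int) + (i : Int) = (i : Int) := by ring
  rw [hz]
  have hscan := scanA_eq prev (i : Int) (by positivity) (by rw [hm]; exact_mod_cast hi)
  rw [hm] at hscan
  rw [hscan]
  have hrow : PySem.List.pyGetD (rowi.take m) (i : Int) 0 = PySem.List.pyGetD rowi (i : Int) 0 := by
    rw [PySem.List.pyGetD_of_nonneg _ _ (by positivity),
        PySem.List.pyGetD_of_nonneg _ _ (by positivity)]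
    simp only [List.getD, show ((i : Int)).toNat = i by omega]
    rw [List.getElem?_take_of_lt hi]
  unfold outSpec
  rw [hrow, show ((i : Int)).toNat = i by omega]
  cases optJoin (prefPart prev (i : Int)) (segMax (prev.drop (i + 1))) <;> rfl

theorem pyGetD_last {α : Type} (l : List α) (i : Int) (x d : α)
    (h1 : 1 ≤ i) (hl : l.length = i.toNat) (hx : l.getLast? = some x) :
    PySem.List.pyGetD l (i - 1) d = x := by
  rw [PySem.List.pyGetD_eq_getElem l d (by omega) (by omega)]
  rw [List.getLast?_eq_getElem?] at hx
  rw [List.getElem?_eq_getElem (by omega)] at hx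
  simp only [show (i - 1).toNat = l.length - 1 by omega]
  exact Option.some.inj hx

theorem fold_inv (fA : List (List Int) → Int → List (List Int)) (fB : List Int → Int → List Int)
    (m : Nat) (row0 prev0 : List Int)
    (hstep : ∀ (OPT : List (List Int)) (p : List Int) (i : Int), 1 ≤ i →
        OPT.length = i.toNat → OPT.getLast? = some p → p.length = m →
        fA OPT i = OPT ++ [fB p i] ∧ (fB p i).length = m)
    (h0 : row0 = prev0) (h0m : prev0.length = m) (t : Nat) (h1 : 1 ≤ t) :
    ((PySem.List.pyRange 1 (t : Int) 1).foldl fA [row0]).length = t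
    ∧ ((PySem.List.pyRange 1 (t : Int) 1).foldl fA [row0]).getLast?
        = some ((PySem.List.pyRange 1 (t : Int) 1).foldl fB prev0)
    ∧ ((PySem.List.pyRange 1 (t : Int) 1).foldl fB prev0).length = m := by
  induction t, h1 using Nat.le_induction with
  | base =>
    rw [PySem.List.pyRange_one_eq_nil (by norm_num)]
    exact ⟨rfl, by rw [h0]; rfl, h0m⟩
  | succ t h1 ih =>
    obtain ⟨hA, hL, hB⟩ := ih
    have hc : ((t + 1 : Nat) : Int) = (t : Int) + 1 := by push_cast; ring
    rw [hc, PySem.List.pyRange_one_succ_right (by exact_mod_cast h1),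
        List.foldl_append, List.foldl_cons, List.foldl_nil,
        List.foldl_append, List.foldl_cons, List.foldl_nil]
    obtain ⟨heq, hlen⟩ := hstep _ _ (t : Int) (by exact_mod_cast h1)
        (by rw [hA]; omega) hL hB
    refine ⟨?_, ?_, hlen⟩
    · rw [heq, List.length_append, hA]
      rfl
    · rw [heq, List.getLast?_concat]

set_option maxHeartbeats 1600000 in
theorem main_eq (act : List (List Int)) (hne : act ≠ []) :
    eventos act = eventos_alt act := by
  have hlen0 : 1 ≤ act.length := List.length_pos_of_ne_nil hne
  simp only [eventos, eventos_alt]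
  obtain ⟨hA, hL, hB⟩ := fold_inv
    (fun OPT i => OPT ++
      [List.foldl (fun cur j => cur ++
          [match List.foldl (fun acc k =>
                if k = j then acc
                else if k = 0 ∧ j ≠ 3 then acc
                else eventosOm acc (PySem.List.pyGetD (PySem.List.pyGetD OPT (i - 1) []) k 0))
              none (PySem.List.pyRange 0 ((PySem.List.pyGetD act 0 []).length : Int)) with
            | some v => PySem.List.pyGetD (PySem.List.pyGetD act i []) j 0 + v
            | none => PySem.List.pyGetD (PySem.List.pyGetD act i []) j 0])
        [] (PySem.List.pyRange 0 ((PySem.List.pyGetD act 0 []).length : Int))])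
    (fun prev i => eventosNextRow prev
      (PySem.List.slice (PySem.List.pyGetD act i []) none (some ((PySem.List.pyGetD act 0 []).length : Int))))
    (PySem.List.pyGetD act 0 []).length
    (List.map (fun j => PySem.List.pyGetD (PySem.List.pyGetD act 0 []) j 0)
      (PySem.List.pyRange 0 ((PySem.List.pyGetD act 0 []).length : Int)))
    (PySem.List.slice (PySem.List.pyGetD act 0 []) none (some ((PySem.List.pyGetD act 0 []).length : Int)))
    (by
      intro OPT p i hi hlenO hlast hpm
      dsimp only
      have hprev : PySem.List.pyGetD OPT (i - 1) [] = p := pyGetD_last OPT i p [] hi hlenO hlast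
      constructor
      · rw [hprev, row_eq p (PySem.List.pyGetD act i []) (PySem.List.pyGetD act 0 []).length hpm]
      · rw [nextRow_spec]
        simp [hpm])
    (by
      rw [PySem.List.slice_to _ (by positivity), Int.toNat_natCast, List.take_length]
      exact PySem.List.map_pyGetD_pyRange_zero' (PySem.List.pyGetD act 0 []) 0)
    (by rw [PySem.List.slice_to _ (by positivity), Int.toNat_natCast, List.take_length])
    act.length hlen0
  rw [pyGetD_last _ (act.length : Int) _ [] (by exact_mod_cast hlen0) (by omega) hL]

-- ===== VERDICT (by name: the statement is the Claim_ definition above) =====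
theorem eventos_spec : Claim_equal_eventos := by
  intro act _ hpre
  unfold Spec_eventos
  exact main_eq act hpre.1
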